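-- pv_equiv track=rewrite | github.com/maumaps/h3-mesh-placement | scripts/install_priority_graph_support.py | component_members
-- ===== SOURCE A (Python) =====
-- from collections import defaultdict, deque
-- from typing import Any, Iterable, Mapping
--
-- def component_members(
--     start_id: int,
--     allowed_ids: set[int],
--     adjacency: Mapping[int, Mapping[int, float]],
-- ) -> set[int]:
--     """Return the connected component inside the remaining subgraph."""
--
--     seen_ids = {start_id}
--     queue = deque([start_id])
--
--     while queue:
--         tower_id = queue.popleft()
--         for neighbor_id in adjacency.get(tower_id, {}):
--             if neighbor_id in allowed_ids and neighbor_id not in seen_ids: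
--                 seen_ids.add(neighbor_id)
--                 queue.append(neighbor_id)
--
--     return seen_ids
-- ===== SOURCE B (Python) =====
-- def component_members(start_id, allowed_ids, adjacency):
--     """Return the connected component inside the remaining subgraph.
--
--     Worklist-free fixpoint iteration (Bellman-Ford style): instead of a BFS
--     queue, repeatedly sweep the whole adjacency mapping, absorbing every
--     allowed neighbor of an already-reached node, until a full sweep adds
--     nothing.  Correct because the component is the least set containing
--     start_id that is closed under allowed edges, and each sweep is monotone.
--     """
--     seen = {start_id}
--     changed = True
--     while changed:
--         changed = False
--         for node, neighbors in adjacency.items():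
--             if node in seen:
--                 for neighbor_id in neighbors:
--                     if neighbor_id in allowed_ids and neighbor_id not in seen:
--                         seen.add(neighbor_id)
--                         changed = True
--     return seen
-- ===== Notes on version B (the rewrite author's own statement) =====
-- stated objective: alternative
-- what changed: Replaces the BFS worklist (deque + per-node expansion) by a queue-free Bellman-Ford-style fixpoint: repeated monotone sweeps over the whole adjacency mapping that absorb allowed neighbors of already-reached nodes until a sweep adds nothing.
import Mathlib
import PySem

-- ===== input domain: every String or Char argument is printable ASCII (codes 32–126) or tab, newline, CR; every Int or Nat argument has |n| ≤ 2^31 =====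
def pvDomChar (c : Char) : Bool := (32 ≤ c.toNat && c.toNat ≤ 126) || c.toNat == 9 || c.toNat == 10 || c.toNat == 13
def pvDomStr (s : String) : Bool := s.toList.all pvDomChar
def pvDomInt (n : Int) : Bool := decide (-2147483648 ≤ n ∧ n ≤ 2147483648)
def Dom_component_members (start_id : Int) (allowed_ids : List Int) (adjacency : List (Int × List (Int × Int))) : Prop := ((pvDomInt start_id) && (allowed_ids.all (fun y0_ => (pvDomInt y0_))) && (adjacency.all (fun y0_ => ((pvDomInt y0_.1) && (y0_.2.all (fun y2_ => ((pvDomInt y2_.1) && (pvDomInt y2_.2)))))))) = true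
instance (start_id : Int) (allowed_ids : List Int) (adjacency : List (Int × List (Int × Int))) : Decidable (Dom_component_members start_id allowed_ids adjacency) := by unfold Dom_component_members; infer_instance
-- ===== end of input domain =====

-- B replaces A's deque-based BFS by a queue-free fixpoint iteration: repeated monotone sweeps
-- over the whole adjacency mapping until a sweep adds nothing (alternative algorithm, not faster).
-- Both Pythons return a SET; a Python set's iteration order is not modelled (PYSEM.md), so both
-- ports return the canonical strictly-sorted list of the set's elements: the equality proved is
-- equality of the returned sets.  Both loops carry fuel as a pure totality guard
-- (allowed_ids.length + 1 provably bounds the iterations/sweeps either Python loop performs, as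
-- the proofs below establish), so each port computes exactly what its Python computes.

-- adjacency.get(x, {}) iterated = the neighbor keys of x (first-match dict lookup)
def pvNbrs (adjacency : List (Int × List (Int × Int))) (x : Int) : List Int :=
  (PySem.Dict.getD (PySem.Dict.mk adjacency) x []).map Prod.fst

-- ===== PORT A =====
-- one step of A's inner `for neighbor_id in adjacency.get(tower_id, {})`, state = (seen_ids, queue)
def pvInnerA (allowed : List Int) (st : List Int × List Int) (nbr : Int) : List Int × List Int :=
  if allowed.contains nbr && !(st.1.contains nbr) then
    (PySem.Set.add st.1 nbr, st.2 ++ [nbr])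
  else st

-- A's `while queue:` loop (fuel = totality guard only)
def pvLoopA (allowed : List Int) (adjacency : List (Int × List (Int × Int))) :
    Nat → List Int → List Int → List Int
  | 0, seen, _ => seen
  | _ + 1, seen, [] => seen
  | fuel + 1, seen, tower_id :: queue =>
    let st := (pvNbrs adjacency tower_id).foldl (pvInnerA allowed) (seen, queue)
    pvLoopA allowed adjacency fuel st.1 st.2

def component_members (start_id : Int) (allowed_ids : List Int) (adjacency : List (Int × List (Int × Int))) : List Int :=
  PySem.List.sorted (pvLoopA allowed_ids adjacency (allowed_ids.length + 1) [start_id] [start_id]) (fun x => x) false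

-- ===== PORT B =====
-- the dict's keys in iteration order (unique keys, first occurrence — the first-match lookup model)
def pvKeys (adjacency : List (Int × List (Int × Int))) : List Int :=
  PySem.List.dedup (adjacency.map Prod.fst)

-- one step of B's inner `for neighbor_id in neighbors`, state = (seen, changed)
def pvAddNbr (allowed : List Int) (st : List Int × Bool) (nbr : Int) : List Int × Bool :=
  if allowed.contains nbr && !(st.1.contains nbr) then (PySem.Set.add st.1 nbr, true) else st

-- one item of B's `for node, neighbors in adjacency.items()` sweep
def pvVisitKey (allowed : List Int) (adjacency : List (Int × List (Int × Int)))
    (st : List Int × Bool) (node : Int) : List Int × Bool :=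
  if st.1.contains node then (pvNbrs adjacency node).foldl (pvAddNbr allowed) st else st

-- one full sweep of B's `changed = False; for node, neighbors in adjacency.items(): …`
def pvPass (allowed : List Int) (adjacency : List (Int × List (Int × Int))) (seen : List Int) :
    List Int × Bool :=
  (pvKeys adjacency).foldl (pvVisitKey allowed adjacency) (seen, false)

-- B's `while changed:` loop (fuel = totality guard only)
def pvLoopB (allowed : List Int) (adjacency : List (Int × List (Int × Int))) :
    Nat → List Int → List Int
  | 0, seen => seen
  | fuel + 1, seen =>
    let st := pvPass allowed adjacency seen
    if st.2 then pvLoopB allowed adjacency fuel st.1 else st.1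

def component_members_alt (start_id : Int) (allowed_ids : List Int) (adjacency : List (Int × List (Int × Int))) : List Int :=
  PySem.List.sorted (pvLoopB allowed_ids adjacency (allowed_ids.length + 1) [start_id]) (fun x => x) false

-- ===== PRECONDITION & SPEC =====
def Spec_component_members (start_id : Int) (allowed_ids : List Int) (adjacency : List (Int × List (Int × Int))) (out : List Int) : Prop := out = component_members_alt start_id allowed_ids adjacency
instance (start_id : Int) (allowed_ids : List Int) (adjacency : List (Int × List (Int × Int))) (out : List Int) : Decidable (Spec_component_members start_id allowed_ids adjacency out) := by unfold Spec_component_members; infer_instance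

-- ===== CLAIM (what is proved, stated in full; the proofs are below) =====
def Claim_equal_component_members : Prop := ∀ (start_id : Int) (allowed_ids : List Int) (adjacency : List (Int × List (Int × Int))), Dom_component_members start_id allowed_ids adjacency → Spec_component_members start_id allowed_ids adjacency (component_members start_id allowed_ids adjacency)

-- ===== LEMMAS AND PROOFS =====

-- the common growth step: absorb each allowed, unseen neighbor of one node
def pvGrow (allowed : List Int) (nbrs seen : List Int) : List Int :=
  nbrs.foldl (fun s n => if allowed.contains n && !(s.contains n) then s ++ [n] else s) seen

-- reachability from start inside the allowed subgraph
inductive pvReach (start : Int) (allowed : List Int) (adjacency : List (Int × List (Int × Int))) : Int → Prop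
  | base : pvReach start allowed adjacency start
  | step {x y : Int} : pvReach start allowed adjacency x → y ∈ pvNbrs adjacency x →
      y ∈ allowed → pvReach start allowed adjacency y

-- a set of nodes closed under allowed edges
def pvClosed (allowed : List Int) (adjacency : List (Int × List (Int × Int))) (r : List Int) : Prop :=
  ∀ x ∈ r, ∀ y ∈ pvNbrs adjacency x, y ∈ allowed → y ∈ r

-- the termination measure: allowed ids not yet seen
def pvMissing (allowed seen : List Int) : Nat :=
  (PySem.List.dedup allowed).countP (fun a => !decide (a ∈ seen))

lemma pvGrow_nil (allowed seen : List Int) : pvGrow allowed [] seen = seen := rfl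

lemma pvGrow_cons (allowed : List Int) (n : Int) (nbrs seen : List Int) :
    pvGrow allowed (n :: nbrs) seen =
      pvGrow allowed nbrs (if allowed.contains n && !(seen.contains n) then seen ++ [n] else seen) := by
  simp only [pvGrow, List.foldl_cons]

lemma pvGrow_cons' (allowed : List Int) (n : Int) (nbrs seen : List Int) :
    pvGrow allowed (n :: nbrs) seen =
      pvGrow allowed nbrs (if n ∈ allowed ∧ n ∉ seen then seen ++ [n] else seen) := by
  rw [pvGrow_cons]
  congr 1
  by_cases h1 : n ∈ allowed <;> by_cases h2 : n ∈ seen <;> simp [h1, h2]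

lemma pvGrow_prefix (allowed : List Int) (nbrs : List Int) :
    ∀ seen : List Int, seen <+: pvGrow allowed nbrs seen := by
  induction nbrs with
  | nil => intro seen; exact List.prefix_rfl
  | cons n nbrs ih =>
    intro seen
    rw [pvGrow_cons']
    split
    · exact (List.prefix_append seen [n]).trans (ih _)
    · exact ih seen

lemma pvGrow_nodup (allowed : List Int) (nbrs : List Int) :
    ∀ seen : List Int, seen.Nodup → (pvGrow allowed nbrs seen).Nodup := by
  induction nbrs with
  | nil => intro seen h; simpa [pvGrow_nil] using h
  | cons n nbrs ih =>
    intro seen h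
    rw [pvGrow_cons']
    split
    · rename_i hc
      exact ih _ (h.append (List.nodup_singleton n)
        (by simpa [List.disjoint_singleton] using hc.2))
    · exact ih seen h

lemma pvGrow_mem (allowed : List Int) (nbrs : List Int) :
    ∀ (seen : List Int) (x : Int),
      x ∈ pvGrow allowed nbrs seen ↔ x ∈ seen ∨ (x ∈ nbrs ∧ x ∈ allowed) := by
  induction nbrs with
  | nil => intro seen x; simp [pvGrow_nil]
  | cons n nbrs ih =>
    intro seen x
    rw [pvGrow_cons']
    by_cases h : n ∈ allowed ∧ n ∉ seen
    · rw [if_pos h, ih]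
      simp only [List.mem_append, List.mem_cons, List.not_mem_nil, or_false]
      constructor
      · rintro ((hx | rfl) | ⟨h1, h2⟩)
        · exact Or.inl hx
        · exact Or.inr ⟨Or.inl rfl, h.1⟩
        · exact Or.inr ⟨Or.inr h1, h2⟩
      · rintro (hx | ⟨(rfl | h1), h2⟩)
        · exact Or.inl (Or.inl hx)
        · exact Or.inl (Or.inr rfl)
        · exact Or.inr ⟨h1, h2⟩
    · rw [if_neg h, ih]
      simp only [List.mem_cons]
      constructor
      · rintro (hx | ⟨h1, h2⟩)
        · exact Or.inl hx
        · exact Or.inr ⟨Or.inr h1, h2⟩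
      · rintro (hx | ⟨(rfl | h1), h2⟩)
        · exact Or.inl hx
        · exact Or.inl (of_not_not (fun hns => h ⟨h2, hns⟩))
        · exact Or.inr ⟨h1, h2⟩

lemma pv_countP_of_not_mem (p : Int → Bool) (n : Int) :
    ∀ L : List Int, n ∉ L →
      List.countP (fun a => p a && !decide (a = n)) L = List.countP p L := by
  intro L
  induction L with
  | nil => simp
  | cons x L ih =>
    intro h
    simp only [List.mem_cons, not_or] at h
    rw [List.countP_cons, List.countP_cons, ih h.2]
    have hx : x ≠ n := fun e => h.1 e.symm
    simp [hx]

lemma pv_countP_remove_point (p : Int → Bool) (n : Int) :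
    ∀ L : List Int, L.Nodup → n ∈ L → p n = true →
      List.countP (fun a => p a && !decide (a = n)) L + 1 = List.countP p L := by
  intro L
  induction L with
  | nil => intro _ h; simp at h
  | cons x L ih =>
    intro hnd hm hp
    rcases List.mem_cons.mp hm with rfl | hm'
    · rw [List.countP_cons, List.countP_cons]
      have hnx : n ∉ L := (List.nodup_cons.mp hnd).1
      rw [pv_countP_of_not_mem p n L hnx]
      simp [hp]
    · have hxn : x ≠ n := fun e => (List.nodup_cons.mp hnd).1 (by rw [e]; exact hm')
      rw [List.countP_cons, List.countP_cons]
      have hrec := ih (List.nodup_cons.mp hnd).2 hm' hp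
      have hxy : (p x && !decide (x = n)) = p x := by simp [hxn]
      rw [hxy]
      cases hpx : p x <;> simp <;> omega

lemma pvMissing_append (allowed seen : List Int) (n : Int) (ha : n ∈ allowed) (hn : n ∉ seen) :
    pvMissing allowed (seen ++ [n]) + 1 = pvMissing allowed seen := by
  unfold pvMissing
  have hcong : ∀ a ∈ PySem.List.dedup allowed,
      ((!decide (a ∈ seen ++ [n])) = true ↔ ((!decide (a ∈ seen)) && !decide (a = n)) = true) := by
    intro a _
    by_cases h1 : a ∈ seen <;> by_cases h2 : a = n <;> simp [h1, h2]
  rw [List.countP_congr hcong]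
  exact pv_countP_remove_point _ n _ (PySem.List.nodup_dedup allowed)
    ((PySem.List.mem_dedup _ _).mpr ha) (by simp [hn])

lemma pvGrow_missing (allowed : List Int) (nbrs : List Int) :
    ∀ seen : List Int,
      pvMissing allowed seen + seen.length =
        pvMissing allowed (pvGrow allowed nbrs seen) + (pvGrow allowed nbrs seen).length := by
  induction nbrs with
  | nil => intro seen; simp [pvGrow_nil]
  | cons n nbrs ih =>
    intro seen
    rw [pvGrow_cons']
    by_cases h : n ∈ allowed ∧ n ∉ seen
    · rw [if_pos h]
      have h1 := pvMissing_append allowed seen n h.1 h.2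
      have h2 := ih (seen ++ [n])
      simp only [List.length_append, List.length_singleton] at h2 ⊢
      omega
    · rw [if_neg h]; exact ih seen

lemma pvInnerA_eval (allowed : List Int) (seen q : List Int) (n : Int) :
    pvInnerA allowed (seen, q) n =
      if allowed.contains n && !(seen.contains n) then (seen ++ [n], q ++ [n]) else (seen, q) := by
  by_cases hm : n ∈ seen
  · simp [pvInnerA, hm]
  · simp [pvInnerA, PySem.Set.add, hm]

-- A's inner fold equals pvGrow on seen, appending the fresh elements to the queue
lemma pvInner_eq (allowed : List Int) (nbrs : List Int) :
    ∀ seen q : List Int,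
      nbrs.foldl (pvInnerA allowed) (seen, q) =
        (pvGrow allowed nbrs seen, q ++ (pvGrow allowed nbrs seen).drop seen.length) := by
  induction nbrs with
  | nil => intro seen q; simp [pvGrow_nil]
  | cons n nbrs ih =>
    intro seen q
    rw [List.foldl_cons, pvInnerA_eval, pvGrow_cons]
    by_cases hc : (allowed.contains n && !(seen.contains n)) = true
    · simp only [if_pos hc]
      rw [ih]
      obtain ⟨r, hr⟩ := pvGrow_prefix allowed nbrs (seen ++ [n])
      have hd1 : (pvGrow allowed nbrs (seen ++ [n])).drop (seen ++ [n]).length = r := by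
        rw [← hr]; exact List.drop_left
      have hd2 : (pvGrow allowed nbrs (seen ++ [n])).drop seen.length = n :: r := by
        rw [← hr, List.append_assoc]
        exact List.drop_left
      rw [hd1, hd2]
      simp
    · simp only [if_neg hc]
      exact ih seen q

-- B's inner fold equals pvGrow on seen, or-ing "did it grow" into the changed flag
lemma pvAddNbr_eval (allowed : List Int) (s : List Int) (c : Bool) (n : Int) :
    pvAddNbr allowed (s, c) n =
      if allowed.contains n && !(s.contains n) then (s ++ [n], true) else (s, c) := by
  by_cases hm : n ∈ s
  · simp [pvAddNbr, hm]
  · simp [pvAddNbr, PySem.Set.add, hm]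

lemma pvInnerB_eq (allowed : List Int) (nbrs : List Int) :
    ∀ (s : List Int) (c : Bool),
      nbrs.foldl (pvAddNbr allowed) (s, c) =
        (pvGrow allowed nbrs s, c || decide (pvGrow allowed nbrs s ≠ s)) := by
  induction nbrs with
  | nil => intro s c; simp [pvGrow_nil]
  | cons n nbrs ih =>
    intro s c
    rw [List.foldl_cons, pvAddNbr_eval, pvGrow_cons]
    by_cases hc : (allowed.contains n && !(s.contains n)) = true
    · rw [if_pos hc, if_pos hc, ih]
      have hpre := pvGrow_prefix allowed nbrs (s ++ [n])
      have hlt : s.length < (pvGrow allowed nbrs (s ++ [n])).length := by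
        have := hpre.length_le
        simp only [List.length_append, List.length_singleton] at this
        omega
      have hne : pvGrow allowed nbrs (s ++ [n]) ≠ s := by
        intro h; rw [h] at hlt; omega
      simp [hne]
    · rw [if_neg hc, if_neg hc]
      exact ih s c

-- the pure value of one whole sweep
def pvSweep (allowed : List Int) (adjacency : List (Int × List (Int × Int)))
    (keys seen : List Int) : List Int :=
  keys.foldl (fun s node => if s.contains node then pvGrow allowed (pvNbrs adjacency node) s else s) seen

lemma pvSweep_nil (allowed : List Int) (adjacency : List (Int × List (Int × Int))) (seen : List Int) :
    pvSweep allowed adjacency [] seen = seen := rfl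

lemma pvSweep_cons (allowed : List Int) (adjacency : List (Int × List (Int × Int)))
    (k : Int) (keys seen : List Int) :
    pvSweep allowed adjacency (k :: keys) seen =
      pvSweep allowed adjacency keys
        (if seen.contains k then pvGrow allowed (pvNbrs adjacency k) seen else seen) := by
  simp only [pvSweep, List.foldl_cons]

lemma pvSweep_prefix (allowed : List Int) (adjacency : List (Int × List (Int × Int))) (keys : List Int) :
    ∀ seen : List Int, seen <+: pvSweep allowed adjacency keys seen := by
  induction keys with
  | nil => intro seen; exact List.prefix_rfl
  | cons k keys ih =>
    intro seen
    rw [pvSweep_cons]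
    split
    · exact (pvGrow_prefix allowed _ seen).trans (ih _)
    · exact ih seen

lemma pvSweep_nodup (allowed : List Int) (adjacency : List (Int × List (Int × Int))) (keys : List Int) :
    ∀ seen : List Int, seen.Nodup → (pvSweep allowed adjacency keys seen).Nodup := by
  induction keys with
  | nil => intro seen h; simpa [pvSweep_nil] using h
  | cons k keys ih =>
    intro seen h
    rw [pvSweep_cons]
    split
    · exact ih _ (pvGrow_nodup allowed _ seen h)
    · exact ih seen h

lemma pvSweep_missing (allowed : List Int) (adjacency : List (Int × List (Int × Int))) (keys : List Int) :
    ∀ seen : List Int,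
      pvMissing allowed seen + seen.length =
        pvMissing allowed (pvSweep allowed adjacency keys seen) + (pvSweep allowed adjacency keys seen).length := by
  induction keys with
  | nil => intro seen; simp [pvSweep_nil]
  | cons k keys ih =>
    intro seen
    rw [pvSweep_cons]
    split
    · rw [pvGrow_missing allowed (pvNbrs adjacency k) seen]
      exact ih _
    · exact ih seen

lemma pv_bool_or_chain (s g S : List Int) (h1 : s <+: g) (h2 : g <+: S) :
    (decide (g ≠ s) || decide (S ≠ g)) = decide (S ≠ s) := by
  by_cases hg : g = s
  · subst hg; simp
  · have hS : S ≠ s := by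
      intro h
      subst h
      exact hg ((h1.eq_of_length (Nat.le_antisymm h1.length_le h2.length_le)).symm)
    simp [hg, hS]

lemma pvVisit_eq (allowed : List Int) (adjacency : List (Int × List (Int × Int))) (keys : List Int) :
    ∀ (s : List Int) (c : Bool),
      keys.foldl (pvVisitKey allowed adjacency) (s, c) =
        (pvSweep allowed adjacency keys s,
          c || decide (pvSweep allowed adjacency keys s ≠ s)) := by
  induction keys with
  | nil => intro s c; simp [pvSweep_nil]
  | cons k keys ih =>
    intro s c
    rw [List.foldl_cons, pvSweep_cons]
    by_cases hk : s.contains k = true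
    · have hv : pvVisitKey allowed adjacency (s, c) k =
          (pvNbrs adjacency k).foldl (pvAddNbr allowed) (s, c) := by
        simp only [pvVisitKey]
        rw [if_pos hk]
      rw [hv, pvInnerB_eq, ih, if_pos hk, Bool.or_assoc,
        pv_bool_or_chain s _ _ (pvGrow_prefix allowed _ s) (pvSweep_prefix allowed adjacency keys _)]
    · have hv : pvVisitKey allowed adjacency (s, c) k = (s, c) := by
        simp only [pvVisitKey]
        rw [if_neg hk]
      rw [hv, if_neg hk]
      exact ih s c

lemma pvPass_eq (allowed : List Int) (adjacency : List (Int × List (Int × Int))) (seen : List Int) :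
    pvPass allowed adjacency seen =
      (pvSweep allowed adjacency (pvKeys adjacency) seen,
        decide (pvSweep allowed adjacency (pvKeys adjacency) seen ≠ seen)) := by
  unfold pvPass
  rw [pvVisit_eq]
  simp

lemma pvSweep_reach (start : Int) (allowed : List Int) (adjacency : List (Int × List (Int × Int)))
    (keys : List Int) :
    ∀ seen : List Int, (∀ x ∈ seen, pvReach start allowed adjacency x) →
      ∀ x ∈ pvSweep allowed adjacency keys seen, pvReach start allowed adjacency x := by
  induction keys with
  | nil => intro seen h; simpa [pvSweep_nil] using h
  | cons k keys ih =>
    intro seen h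
    rw [pvSweep_cons]
    by_cases hk : seen.contains k = true
    · rw [if_pos hk]
      apply ih
      intro x hx
      rcases (pvGrow_mem allowed _ seen x).mp hx with hx' | ⟨h1, h2⟩
      · exact h x hx'
      · exact pvReach.step (h k (by simpa using hk)) h1 h2
    · rw [if_neg hk]
      exact ih seen h

lemma pvSweep_fix (allowed : List Int) (adjacency : List (Int × List (Int × Int))) (keys : List Int) :
    ∀ seen : List Int, pvSweep allowed adjacency keys seen = seen →
      ∀ k ∈ keys, k ∈ seen → pvGrow allowed (pvNbrs adjacency k) seen = seen := by
  induction keys with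
  | nil => intro seen _ k hk; simp at hk
  | cons k0 keys ih =>
    intro seen hfix k hkmem hks
    rw [pvSweep_cons] at hfix
    have h1 : seen <+: (if seen.contains k0 then pvGrow allowed (pvNbrs adjacency k0) seen else seen) := by
      split
      · exact pvGrow_prefix allowed _ seen
      · exact List.prefix_rfl
    have h2 := pvSweep_prefix allowed adjacency keys
      (if seen.contains k0 then pvGrow allowed (pvNbrs adjacency k0) seen else seen)
    rw [hfix] at h2
    have hse : (if seen.contains k0 then pvGrow allowed (pvNbrs adjacency k0) seen else seen) = seen :=
      (h1.eq_of_length (Nat.le_antisymm h1.length_le h2.length_le)).symm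
    rcases List.mem_cons.mp hkmem with rfl | hmem
    · have hc : seen.contains k = true := by simpa using hks
      rw [if_pos hc] at hse
      exact hse
    · rw [hse] at hfix
      exact ih seen hfix k hmem hks

lemma pvNbrs_eq_nil (adjacency : List (Int × List (Int × Int))) (x : Int)
    (hx : x ∉ adjacency.map Prod.fst) : pvNbrs adjacency x = [] := by
  unfold pvNbrs
  have hc : (PySem.Dict.mk adjacency).contains x = false := by
    rw [PySem.Dict.contains_eq_decide_mem_keys]
    simp only [PySem.Dict.keys_mk]
    simpa using hx
  rw [PySem.Dict.getD_of_not_contains _ _ hc]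
  rfl

lemma pvClosed_of_fix (allowed : List Int) (adjacency : List (Int × List (Int × Int))) (seen : List Int)
    (hfix : pvSweep allowed adjacency (pvKeys adjacency) seen = seen) :
    pvClosed allowed adjacency seen := by
  intro x hx y hy hya
  by_cases hk : x ∈ adjacency.map Prod.fst
  · have hkk : x ∈ pvKeys adjacency := by
      unfold pvKeys
      exact (PySem.List.mem_dedup _ _).mpr hk
    have hgrow := pvSweep_fix allowed adjacency (pvKeys adjacency) seen hfix x hkk hx
    have hmem := (pvGrow_mem allowed (pvNbrs adjacency x) seen y).mpr (Or.inr ⟨hy, hya⟩)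
    rw [hgrow] at hmem
    exact hmem
  · rw [pvNbrs_eq_nil adjacency x hk] at hy
    simp at hy

-- one A-iteration, written out
lemma pvLoopA_cons (allowed : List Int) (adjacency : List (Int × List (Int × Int)))
    (fuel : Nat) (seen : List Int) (t : Int) (q : List Int) :
    pvLoopA allowed adjacency (fuel + 1) seen (t :: q) =
      pvLoopA allowed adjacency fuel (pvGrow allowed (pvNbrs adjacency t) seen)
        (q ++ (pvGrow allowed (pvNbrs adjacency t) seen).drop seen.length) := by
  simp only [pvLoopA]
  rw [pvInner_eq]

lemma pvLoopA_main (allowed : List Int) (adjacency : List (Int × List (Int × Int))) :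
    ∀ (fuel : Nat) (seen queue : List Int),
      seen.Nodup →
      (∀ z ∈ queue, z ∈ seen) →
      (∀ x ∈ seen, x ∉ queue → ∀ y ∈ pvNbrs adjacency x, y ∈ allowed → y ∈ seen) →
      queue.length + pvMissing allowed seen ≤ fuel →
      (∀ x ∈ seen, x ∈ pvLoopA allowed adjacency fuel seen queue) ∧
        (pvLoopA allowed adjacency fuel seen queue).Nodup ∧
        pvClosed allowed adjacency (pvLoopA allowed adjacency fuel seen queue) := by
  intro fuel
  induction fuel with
  | zero =>
    intro seen queue hnd hq hinv hm
    have hq0 : queue = [] := List.length_eq_zero_iff.mp (by omega)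
    subst hq0
    simp only [pvLoopA]
    exact ⟨fun x hx => hx, hnd, fun x hx y hy hya => hinv x hx (by simp) y hy hya⟩
  | succ fuel ih =>
    intro seen queue hnd hq hinv hm
    cases queue with
    | nil =>
      simp only [pvLoopA]
      exact ⟨fun x hx => hx, hnd, fun x hx y hy hya => hinv x hx (by simp) y hy hya⟩
    | cons t q =>
      rw [pvLoopA_cons]
      obtain ⟨r, hr⟩ := pvGrow_prefix allowed (pvNbrs adjacency t) seen
      have hdrop : (pvGrow allowed (pvNbrs adjacency t) seen).drop seen.length = r := by
        rw [← hr]; exact List.drop_left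
      rw [hdrop]
      have happ : seen ++ r = pvGrow allowed (pvNbrs adjacency t) seen := hr
      have hnd' : (pvGrow allowed (pvNbrs adjacency t) seen).Nodup :=
        pvGrow_nodup allowed _ seen hnd
      have hsub : ∀ x ∈ seen, x ∈ pvGrow allowed (pvNbrs adjacency t) seen := by
        intro x hx; rw [← happ]; exact List.mem_append_left _ hx
      have hq' : ∀ z ∈ q ++ r, z ∈ pvGrow allowed (pvNbrs adjacency t) seen := by
        intro z hz
        rcases List.mem_append.mp hz with hz | hz
        · exact hsub z (hq z (List.mem_cons_of_mem _ hz))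
        · rw [← happ]; exact List.mem_append_right _ hz
      have hinv' : ∀ x ∈ pvGrow allowed (pvNbrs adjacency t) seen, x ∉ q ++ r →
          ∀ y ∈ pvNbrs adjacency x, y ∈ allowed → y ∈ pvGrow allowed (pvNbrs adjacency t) seen := by
        intro x hx hxq y hy hya
        have hxseen : x ∈ seen := by
          rw [← happ] at hx
          rcases List.mem_append.mp hx with h | h
          · exact h
          · exact absurd (List.mem_append_right q h) hxq
        by_cases hxt : x = t
        · subst hxt
          exact (pvGrow_mem allowed _ seen y).mpr (Or.inr ⟨hy, hya⟩)
        · have hxq0 : x ∉ t :: q := by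
            simp only [List.mem_cons, not_or]
            exact ⟨hxt, fun hc => hxq (List.mem_append_left _ hc)⟩
          exact hsub y (hinv x hxseen hxq0 y hy hya)
      have hmeq := pvGrow_missing allowed (pvNbrs adjacency t) seen
      have hlen : (pvGrow allowed (pvNbrs adjacency t) seen).length = seen.length + r.length := by
        rw [← happ]; simp
      have hm' : (q ++ r).length + pvMissing allowed (pvGrow allowed (pvNbrs adjacency t) seen) ≤ fuel := by
        simp only [List.length_append]
        simp only [List.length_cons] at hm
        omega
      obtain ⟨ha, hb, hc⟩ := ih (pvGrow allowed (pvNbrs adjacency t) seen) (q ++ r) hnd' hq' hinv' hm'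
      exact ⟨fun x hx => ha _ (hsub x hx), hb, hc⟩

lemma pvLoopA_reach (start : Int) (allowed : List Int) (adjacency : List (Int × List (Int × Int))) :
    ∀ (fuel : Nat) (seen queue : List Int),
      (∀ x ∈ seen, pvReach start allowed adjacency x) →
      (∀ z ∈ queue, z ∈ seen) →
      ∀ x ∈ pvLoopA allowed adjacency fuel seen queue, pvReach start allowed adjacency x := by
  intro fuel
  induction fuel with
  | zero =>
    intro seen queue h hq x hx
    exact h x (by simpa [pvLoopA] using hx)
  | succ fuel ih =>
    intro seen queue h hq
    cases queue with
    | nil =>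
      intro x hx
      exact h x (by simpa [pvLoopA] using hx)
    | cons t q =>
      rw [pvLoopA_cons]
      apply ih
      · intro x hx
        rcases (pvGrow_mem allowed _ seen x).mp hx with h1 | ⟨h1, h2⟩
        · exact h x h1
        · exact pvReach.step (h t (hq t (by simp))) h1 h2
      · intro z hz
        rcases List.mem_append.mp hz with hz | hz
        · exact (pvGrow_prefix allowed _ seen).subset (hq z (List.mem_cons_of_mem _ hz))
        · exact List.drop_subset _ _ hz

lemma pvLoopB_succ (allowed : List Int) (adjacency : List (Int × List (Int × Int)))
    (fuel : Nat) (seen : List Int) :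
    pvLoopB allowed adjacency (fuel + 1) seen =
      (if pvSweep allowed adjacency (pvKeys adjacency) seen ≠ seen then
        pvLoopB allowed adjacency fuel (pvSweep allowed adjacency (pvKeys adjacency) seen)
      else pvSweep allowed adjacency (pvKeys adjacency) seen) := by
  simp only [pvLoopB, pvPass_eq]
  by_cases h : pvSweep allowed adjacency (pvKeys adjacency) seen = seen
  · simp [h]
  · simp [h]

lemma pvLoopB_main (allowed : List Int) (adjacency : List (Int × List (Int × Int))) :
    ∀ (fuel : Nat) (seen : List Int),
      seen.Nodup →
      pvMissing allowed seen + 1 ≤ fuel →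
      (∀ x ∈ seen, x ∈ pvLoopB allowed adjacency fuel seen) ∧
        (pvLoopB allowed adjacency fuel seen).Nodup ∧
        pvClosed allowed adjacency (pvLoopB allowed adjacency fuel seen) := by
  intro fuel
  induction fuel with
  | zero => intro seen hnd hm; omega
  | succ fuel ih =>
    intro seen hnd hm
    rw [pvLoopB_succ]
    by_cases hfix : pvSweep allowed adjacency (pvKeys adjacency) seen = seen
    · rw [if_neg (by simp [hfix])]
      rw [hfix]
      exact ⟨fun x hx => hx, hnd, pvClosed_of_fix allowed adjacency seen hfix⟩
    · rw [if_pos hfix]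
      have hpre := pvSweep_prefix allowed adjacency (pvKeys adjacency) seen
      have hlt : seen.length < (pvSweep allowed adjacency (pvKeys adjacency) seen).length := by
        rcases Nat.lt_or_ge seen.length (pvSweep allowed adjacency (pvKeys adjacency) seen).length with h | h
        · exact h
        · exact absurd ((hpre.eq_of_length (Nat.le_antisymm hpre.length_le h)).symm) hfix
      have hmeq := pvSweep_missing allowed adjacency (pvKeys adjacency) seen
      have hm' : pvMissing allowed (pvSweep allowed adjacency (pvKeys adjacency) seen) + 1 ≤ fuel := by
        omega
      obtain ⟨ha, hb, hc⟩ := ih (pvSweep allowed adjacency (pvKeys adjacency) seen)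
        (pvSweep_nodup allowed adjacency (pvKeys adjacency) seen hnd) hm'
      exact ⟨fun x hx => ha _ (hpre.subset hx), hb, hc⟩

lemma pvLoopB_reach (start : Int) (allowed : List Int) (adjacency : List (Int × List (Int × Int))) :
    ∀ (fuel : Nat) (seen : List Int),
      (∀ x ∈ seen, pvReach start allowed adjacency x) →
      ∀ x ∈ pvLoopB allowed adjacency fuel seen, pvReach start allowed adjacency x := by
  intro fuel
  induction fuel with
  | zero =>
    intro seen h x hx
    exact h x (by simpa [pvLoopB] using hx)
  | succ fuel ih =>
    intro seen h
    rw [pvLoopB_succ]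
    split
    · exact ih _ (pvSweep_reach start allowed adjacency (pvKeys adjacency) seen h)
    · exact pvSweep_reach start allowed adjacency (pvKeys adjacency) seen h

lemma pvReach_mem (start : Int) (allowed : List Int) (adjacency : List (Int × List (Int × Int)))
    (r : List Int) (hstart : start ∈ r) (hcl : pvClosed allowed adjacency r) :
    ∀ x, pvReach start allowed adjacency x → x ∈ r := by
  intro x hx
  induction hx with
  | base => exact hstart
  | step _ hy hya ih => exact hcl _ ih _ hy hya

-- ===== VERDICT (by name: the statement is the Claim_ definition above) =====
theorem component_members_spec : Claim_equal_component_members := by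
  intro start allowed adjacency _
  unfold Spec_component_members component_members component_members_alt
  have hnd0 : ([start] : List Int).Nodup := List.nodup_singleton _
  have hmiss0 : pvMissing allowed [start] ≤ allowed.length := by
    calc pvMissing allowed [start] ≤ (PySem.List.dedup allowed).length := List.countP_le_length
    _ ≤ allowed.length :=
        (List.subperm_of_subset (PySem.List.nodup_dedup allowed)
          (fun a ha => (PySem.List.mem_dedup _ _).mp ha)).length_le
  obtain ⟨hAsub, hAnd, hAcl⟩ := pvLoopA_main allowed adjacency (allowed.length + 1) [start] [start]
    hnd0 (fun z hz => hz) (fun x hx hxq => absurd hx hxq)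
    (by simp only [List.length_singleton]; omega)
  obtain ⟨hBsub, hBnd, hBcl⟩ := pvLoopB_main allowed adjacency (allowed.length + 1) [start]
    hnd0 (by omega)
  have hAr := pvLoopA_reach start allowed adjacency (allowed.length + 1) [start] [start]
    (fun x hx => by simp at hx; subst hx; exact pvReach.base) (fun z hz => hz)
  have hBr := pvLoopB_reach start allowed adjacency (allowed.length + 1) [start]
    (fun x hx => by simp at hx; subst hx; exact pvReach.base)
  have hstartA : start ∈ pvLoopA allowed adjacency (allowed.length + 1) [start] [start] :=
    hAsub start (by simp)
  have hstartB : start ∈ pvLoopB allowed adjacency (allowed.length + 1) [start] :=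
    hBsub start (by simp)
  have hmemiff : ∀ a, a ∈ pvLoopA allowed adjacency (allowed.length + 1) [start] [start] ↔
      a ∈ pvLoopB allowed adjacency (allowed.length + 1) [start] := by
    intro a
    constructor
    · intro h
      exact pvReach_mem start allowed adjacency _ hstartB hBcl a (hAr a h)
    · intro h
      exact pvReach_mem start allowed adjacency _ hstartA hAcl a (hBr a h)
  have hperm : (pvLoopA allowed adjacency (allowed.length + 1) [start] [start]).Perm
      (pvLoopB allowed adjacency (allowed.length + 1) [start]) :=
    (List.perm_ext_iff_of_nodup hAnd hBnd).mpr hmemiff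
  exact PySem.List.sorted_eq_sorted_of_perm _ _ (fun x => x) (fun a b h => h) hperm
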